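-- pv_equiv track=rewrite | github.com/johndimm/comics-sales | app/main.py | _parse_pgm_folder
-- ===== SOURCE A (Python) =====
-- PGM_SERIES_PREFIX = {
--     "asm": "Amazing Spider-Man",
--     "asmannual": "Amazing Spider-Man Annual",
--     "ff": "Fantastic Four",
--     "ffannual": "Fantastic Four Annual",
-- }
--
-- def _parse_pgm_folder(name: str):
--     n = (name or "").strip().lower()
--     for prefix in sorted(PGM_SERIES_PREFIX.keys(), key=len, reverse=True):
--         if n.startswith(prefix):
--             num = n[len(prefix):]
--             if num.isdigit():
--                 return PGM_SERIES_PREFIX[prefix], str(int(num))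
--     return None, None
-- ===== SOURCE B (Python) =====
-- PGM_SERIES_PREFIX = {
--     "asm": "Amazing Spider-Man",
--     "asmannual": "Amazing Spider-Man Annual",
--     "ff": "Fantastic Four",
--     "ffannual": "Fantastic Four Annual",
-- }
--
-- def _parse_pgm_folder(name: str):
--     n = (name or "").strip().lower()
--     i = 0
--     while i < len(n) and n[i].isalpha():
--         i += 1
--     prefix, num = n[:i], n[i:]
--     if prefix in PGM_SERIES_PREFIX and num.isdigit():
--         return PGM_SERIES_PREFIX[prefix], str(int(num))
--     return None, None
-- ===== Notes on version B (the rewrite author's own statement) =====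
-- stated objective: simpler
-- what changed: Instead of trying each known prefix in length-sorted order with startswith, B splits the normalized name once into its leading alphabetic run and the remainder and does a single dict membership/lookup on that run.
import Mathlib
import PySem

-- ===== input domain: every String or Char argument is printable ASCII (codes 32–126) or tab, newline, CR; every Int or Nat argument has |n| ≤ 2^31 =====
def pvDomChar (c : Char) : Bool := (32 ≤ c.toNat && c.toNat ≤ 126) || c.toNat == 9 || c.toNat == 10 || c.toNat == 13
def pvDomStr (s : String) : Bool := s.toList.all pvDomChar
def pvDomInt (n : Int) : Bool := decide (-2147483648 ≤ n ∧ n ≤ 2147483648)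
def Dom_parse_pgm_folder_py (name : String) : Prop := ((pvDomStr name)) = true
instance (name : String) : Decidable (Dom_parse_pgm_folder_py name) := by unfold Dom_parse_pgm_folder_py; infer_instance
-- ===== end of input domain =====

-- B replaces A's try-each-sorted-prefix loop by one alpha/digit split of the name followed by a single dict lookup (objective: simpler).

-- ===== PORT A =====
-- PGM_SERIES_PREFIX (module constant shared by A and B, exactly as in Python)
def pgmSeriesPrefix : PySem.Dict String String :=
  ((((PySem.Dict.empty).insert "asm" "Amazing Spider-Man").insert
      "asmannual" "Amazing Spider-Man Annual").insert
      "ff" "Fantastic Four").insert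
      "ffannual" "Fantastic Four Annual"

-- str(int(num)); int() cannot raise here: strIsdigit num guarantees ofChars? is some, so the getD default never fires
def pyIntOfDigitsStr (cs : List Char) : String :=
  PySem.Int.toStr ((PySem.Int.ofChars? cs).getD 0)

-- the 'for prefix in sorted(...)' loop of A
def parseLoopA (n : List Char) : List String → Option String × Option String
  | [] => (none, none)
  | p :: rest =>
    if PySem.Chars.startswith n p.toList then
      let num := PySem.List.slice n (some (PySem.Str.len p)) none
      if PySem.Chars.strIsdigit num then
        (pgmSeriesPrefix.get? p, some (pyIntOfDigitsStr num))
      else parseLoopA n rest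
    else parseLoopA n rest

def parse_pgm_folder_py (name : String) : Option String × Option String :=
  let n := PySem.Chars.lower (PySem.Chars.strip name.toList)
  parseLoopA n (PySem.List.sorted pgmSeriesPrefix.keys (fun k => PySem.Str.len k) true)

-- ===== PORT B =====

def parse_pgm_folder_py_alt (name : String) : Option String × Option String :=
  let n := PySem.Chars.lower (PySem.Chars.strip name.toList)
  -- while i < len(n) and n[i].isalpha(): i += 1;  prefix, num = n[:i], n[i:]
  let pre := n.takeWhile PySem.Chars.isalpha
  let num := n.dropWhile PySem.Chars.isalpha
  if pgmSeriesPrefix.contains (String.ofList pre) && PySem.Chars.strIsdigit num then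
    (pgmSeriesPrefix.get? (String.ofList pre), some (pyIntOfDigitsStr num))
  else (none, none)

-- ===== PRECONDITION & SPEC =====
def Spec_parse_pgm_folder_py (name : String) (out : Option String × Option String) : Prop := out = parse_pgm_folder_py_alt name
instance (name : String) (out : Option String × Option String) : Decidable (Spec_parse_pgm_folder_py name out) := by unfold Spec_parse_pgm_folder_py; infer_instance

-- ===== CLAIM (what is proved, stated in full; the proofs are below) =====
def Claim_equal_parse_pgm_folder_py : Prop := ∀ (name : String), Dom_parse_pgm_folder_py name → Spec_parse_pgm_folder_py name (parse_pgm_folder_py name)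

-- ===== LEMMAS AND PROOFS =====

theorem pv_digit_not_alpha (c : Char) (h : PySem.Chars.isdigit c = true) :
    PySem.Chars.isalpha c = false := by
  have h0 : '0'.val.toNat = 48 := rfl
  have h9 : '9'.val.toNat = 57 := rfl
  have hA : 'A'.val.toNat = 65 := rfl
  have hZ : 'Z'.val.toNat = 90 := rfl
  have ha : 'a'.val.toNat = 97 := rfl
  have hz : 'z'.val.toNat = 122 := rfl
  simp only [PySem.Chars.isdigit, PySem.Chars.isalpha, PySem.Chars.isupper, PySem.Chars.islower,
    Bool.and_eq_true, decide_eq_true_eq, Bool.or_eq_false_iff, Bool.and_eq_false_iff,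
    decide_eq_false_iff_not, not_le, Char.le_def, UInt32.le_iff_toNat_le, h0, h9, hA, hZ, ha, hz] at *
  omega

theorem pv_tw_split (p d : List Char) (hp : ∀ c ∈ p, PySem.Chars.isalpha c = true)
    (hd : ∀ c, d.head? = some c → PySem.Chars.isalpha c = false) :
    (p ++ d).takeWhile PySem.Chars.isalpha = p ∧ (p ++ d).dropWhile PySem.Chars.isalpha = d := by
  induction p with
  | nil =>
    simp only [List.nil_append]
    cases d with
    | nil => simp
    | cons c t => simp [hd c rfl]
  | cons a p ih =>
    have ha := hp a (by simp)
    have ⟨h1, h2⟩ := ih (fun c hc => hp c (by simp [hc]))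
    simp [ha, h1, h2]

theorem pv_digits_head (d : List Char) (h : PySem.Chars.strIsdigit d = true) :
    ∀ c, d.head? = some c → PySem.Chars.isalpha c = false := by
  intro c hc
  simp only [PySem.Chars.strIsdigit, Bool.and_eq_true, List.all_eq_true] at h
  exact pv_digit_not_alpha c (h.2 c (List.mem_of_mem_head? hc))

theorem pv_L1 (n p : List Char) (hp : ∀ c ∈ p, PySem.Chars.isalpha c = true)
    (h1 : p.isPrefixOf n = true) (h2 : PySem.Chars.strIsdigit (n.drop p.length) = true) :
    n.takeWhile PySem.Chars.isalpha = p ∧ n.dropWhile PySem.Chars.isalpha = n.drop p.length := by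
  obtain ⟨d, rfl⟩ := List.isPrefixOf_iff_prefix.mp h1
  rw [List.drop_left] at h2 ⊢
  exact pv_tw_split p d hp (pv_digits_head d h2)

theorem pv_L2 (n p : List Char) (h : n.takeWhile PySem.Chars.isalpha = p) :
    p.isPrefixOf n = true ∧ n.drop p.length = n.dropWhile PySem.Chars.isalpha := by
  have hsplit : p ++ n.dropWhile PySem.Chars.isalpha = n := by
    rw [← h]; exact List.takeWhile_append_dropWhile
  constructor
  · rw [List.isPrefixOf_iff_prefix]; exact ⟨_, hsplit⟩
  · conv_lhs => rw [← hsplit]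
    rw [List.drop_left]

theorem pv_loop_skip (n : List Char) (p : String) (rest : List String)
    (hp : p.toList.all PySem.Chars.isalpha = true)
    (h : ¬ (n.takeWhile PySem.Chars.isalpha = p.toList ∧
            PySem.Chars.strIsdigit (n.dropWhile PySem.Chars.isalpha) = true)) :
    parseLoopA n (p :: rest) = parseLoopA n rest := by
  simp only [parseLoopA, PySem.Chars.startswith]
  by_cases hs : p.toList.isPrefixOf n = true
  · have hlen : PySem.List.slice n (some (PySem.Str.len p)) none = n.drop p.toList.length := by
      have := PySem.List.slice_from n (a := (p.toList.length : Int)) (by positivity)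
      simp only [PySem.Str.len, Int.toNat_natCast] at this ⊢
      exact this
    rw [hs, hlen]
    simp only [reduceIte]
    by_cases hdig : PySem.Chars.strIsdigit (n.drop p.toList.length) = true
    · exact absurd ⟨(pv_L1 n p.toList (List.all_eq_true.mp hp) hs hdig).1,
        by rw [(pv_L1 n p.toList (List.all_eq_true.mp hp) hs hdig).2]; exact hdig⟩ h
    · rw [if_neg hdig]
  · simp [hs]

theorem pv_loop_hit (n : List Char) (p : String) (rest : List String)
    (h1 : n.takeWhile PySem.Chars.isalpha = p.toList)
    (h2 : PySem.Chars.strIsdigit (n.dropWhile PySem.Chars.isalpha) = true) :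
    parseLoopA n (p :: rest) =
      (pgmSeriesPrefix.get? p, some (pyIntOfDigitsStr (n.dropWhile PySem.Chars.isalpha))) := by
  obtain ⟨hpre, hdrop⟩ := pv_L2 n p.toList h1
  simp only [parseLoopA, PySem.Chars.startswith]
  have hlen : PySem.List.slice n (some (PySem.Str.len p)) none = n.drop p.toList.length := by
    have := PySem.List.slice_from n (a := (p.toList.length : Int)) (by positivity)
    simp only [PySem.Str.len, Int.toNat_natCast] at this ⊢
    exact this
  rw [hlen, hdrop]
  simp only [hpre, h2, reduceIte]

theorem pv_ofList_beq_false (t : List Char) (s : String) (h : t ≠ s.toList) :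
    (String.ofList t == s) = false := by
  simp only [beq_eq_false_iff_ne, ne_eq]
  intro he
  exact h (by rw [← he, String.toList_ofList])

set_option maxRecDepth 8192 in
theorem pv_main (n : List Char) :
    parseLoopA n (PySem.List.sorted pgmSeriesPrefix.keys (fun k => PySem.Str.len k) true) =
      (if pgmSeriesPrefix.contains (String.ofList (n.takeWhile PySem.Chars.isalpha)) &&
          PySem.Chars.strIsdigit (n.dropWhile PySem.Chars.isalpha) then
        (pgmSeriesPrefix.get? (String.ofList (n.takeWhile PySem.Chars.isalpha)),
          some (pyIntOfDigitsStr (n.dropWhile PySem.Chars.isalpha)))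
      else (none, none)) := by
  have hsorted : PySem.List.sorted pgmSeriesPrefix.keys (fun k => PySem.Str.len k) true =
      ["asmannual", "ffannual", "asm", "ff"] := rfl
  rw [hsorted]
  by_cases hd : PySem.Chars.strIsdigit (n.dropWhile PySem.Chars.isalpha) = true
  · by_cases e1 : n.takeWhile PySem.Chars.isalpha = "asmannual".toList
    · rw [pv_loop_hit n "asmannual" _ e1 hd, e1]
      have hc : pgmSeriesPrefix.contains (String.ofList "asmannual".toList) = true := rfl
      simp only [hc, hd, Bool.and_self, reduceIte]
      exact congrArg (fun v => (v, some (pyIntOfDigitsStr (n.dropWhile PySem.Chars.isalpha)))) rfl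
    · rw [pv_loop_skip n "asmannual" _ (by rfl) (fun hc => e1 hc.1)]
      by_cases e2 : n.takeWhile PySem.Chars.isalpha = "ffannual".toList
      · rw [pv_loop_hit n "ffannual" _ e2 hd, e2]
        have hc : pgmSeriesPrefix.contains (String.ofList "ffannual".toList) = true := rfl
        simp only [hc, hd, Bool.and_self, reduceIte]
        exact congrArg (fun v => (v, some (pyIntOfDigitsStr (n.dropWhile PySem.Chars.isalpha)))) rfl
      · rw [pv_loop_skip n "ffannual" _ (by rfl) (fun hc => e2 hc.1)]
        by_cases e3 : n.takeWhile PySem.Chars.isalpha = "asm".toList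
        · rw [pv_loop_hit n "asm" _ e3 hd, e3]
          have hc : pgmSeriesPrefix.contains (String.ofList "asm".toList) = true := rfl
          simp only [hc, hd, Bool.and_self, reduceIte]
          exact congrArg (fun v => (v, some (pyIntOfDigitsStr (n.dropWhile PySem.Chars.isalpha)))) rfl
        · rw [pv_loop_skip n "asm" _ (by rfl) (fun hc => e3 hc.1)]
          by_cases e4 : n.takeWhile PySem.Chars.isalpha = "ff".toList
          · rw [pv_loop_hit n "ff" _ e4 hd, e4]
            have hc : pgmSeriesPrefix.contains (String.ofList "ff".toList) = true := rfl
            simp only [hc, hd, Bool.and_self, reduceIte]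
            exact congrArg (fun v => (v, some (pyIntOfDigitsStr (n.dropWhile PySem.Chars.isalpha)))) rfl
          · rw [pv_loop_skip n "ff" _ (by rfl) (fun hc => e4 hc.1)]
            have hcont : pgmSeriesPrefix.contains
                (String.ofList (n.takeWhile PySem.Chars.isalpha)) = false := by
              simp only [pgmSeriesPrefix, PySem.Dict.contains_insert, PySem.Dict.contains_empty,
                pv_ofList_beq_false _ _ e1, pv_ofList_beq_false _ _ e2,
                pv_ofList_beq_false _ _ e3, pv_ofList_beq_false _ _ e4, Bool.or_false]
            rw [hcont]
            simp [parseLoopA]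
  · have hskip : ∀ (p : String), p.toList.all PySem.Chars.isalpha = true →
        ∀ rest, parseLoopA n (p :: rest) = parseLoopA n rest := by
      intro p hp rest
      exact pv_loop_skip n p rest hp (fun hc => hd hc.2)
    rw [hskip "asmannual" (by rfl) _, hskip "ffannual" (by rfl) _,
      hskip "asm" (by rfl) _, hskip "ff" (by rfl) _]
    simp [parseLoopA, hd]

-- ===== VERDICT (by name: the statement is the Claim_ definition above) =====
theorem parse_pgm_folder_py_spec : Claim_equal_parse_pgm_folder_py := by
  intro name _
  unfold Spec_parse_pgm_folder_py parse_pgm_folder_py parse_pgm_folder_py_alt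
  exact pv_main _
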